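-- pv_equiv track=rewrite | github.com/EncryptedVoid/PaperTrail | src/utilities/automatic_sorting.py | _is_professional_tool
-- ===== SOURCE A (Python) =====
-- def _is_professional_tool(metadata: dict) -> bool:
--     """
--     Check if document was created with professional publishing tools.
--
--     Professional publishing software (InDesign, LaTeX, etc.) is typically
--     used for book production rather than personal documents.
--
--     Args:
--                     metadata: Metadata dictionary from Tika
--
--     Returns:
--                     bool: True if professional tool detected, False otherwise
--     """
--     if not metadata:
--         return False
--
--     # List of professional publishing tools
--     # These tools are primarily used for professional book/magazine production
--     professional_tools = [
--         "Adobe InDesign",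
--         "InDesign",
--         "LaTeX",  # Academic publishing system
--         "XeTeX",  # LaTeX variant
--         "LuaTeX",  # LaTeX variant
--         "Calibre",  # E-book management
--         "Scribus",  # Open-source desktop publishing
--         "QuarkXPress",  # Professional page layout
--         "FrameMaker",  # Technical documentation
--         "Microsoft Publisher",
--         "Sigil",  # EPUB editor
--         "Vellum",  # Book formatting
--     ]
--
--     # Check creator/producer metadata fields
--     # Different standards store creator info in different fields
--     creator_fields = [
--         "creator",
--         "producer",
--         "Application",
--         "Creator",
--         "Producer",
--         "pdf:producer",
--         "xmp:CreatorTool",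
--         "meta:creator",
--     ]
--
--     # Search for professional tool names in creator fields
--     for field in creator_fields:
--         if field in metadata and metadata[field]:
--             # Convert to string and lowercase for comparison
--             creator = str(metadata[field])
--             for tool in professional_tools:
--                 # Case-insensitive substring search
--                 if tool.lower() in creator.lower():
--                     return True
--
--     return False
-- ===== SOURCE B (Python) =====
-- def _is_professional_tool(metadata: dict) -> bool:
--     """Gather-then-scan reimplementation: collect all truthy creator fields into
--     one NUL-joined lowercased string, then scan it once per tool name."""
--     if not metadata:
--         return False
--
--     professional_tools = [
--         "Adobe InDesign",
--         "InDesign",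
--         "LaTeX",
--         "XeTeX",
--         "LuaTeX",
--         "Calibre",
--         "Scribus",
--         "QuarkXPress",
--         "FrameMaker",
--         "Microsoft Publisher",
--         "Sigil",
--         "Vellum",
--     ]
--
--     creator_fields = [
--         "creator",
--         "producer",
--         "Application",
--         "Creator",
--         "Producer",
--         "pdf:producer",
--         "xmp:CreatorTool",
--         "meta:creator",
--     ]
--
--     # '\x00' cannot occur in any tool name, so no tool can match across a boundary.
--     values = [str(metadata[f]) for f in creator_fields if f in metadata and metadata[f]]
--     combined = "\x00".join(values).lower()
--     return any(tool.lower() in combined for tool in professional_tools)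
-- ===== Notes on version B (the rewrite author's own statement) =====
-- stated objective: simpler
-- what changed: Replaced the nested field-loop/tool-loop with early return by a gather-then-scan decomposition: all truthy creator-field values are collected once into a single NUL-joined lowercased string, and each tool name is searched once in that combined string.
import Mathlib
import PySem

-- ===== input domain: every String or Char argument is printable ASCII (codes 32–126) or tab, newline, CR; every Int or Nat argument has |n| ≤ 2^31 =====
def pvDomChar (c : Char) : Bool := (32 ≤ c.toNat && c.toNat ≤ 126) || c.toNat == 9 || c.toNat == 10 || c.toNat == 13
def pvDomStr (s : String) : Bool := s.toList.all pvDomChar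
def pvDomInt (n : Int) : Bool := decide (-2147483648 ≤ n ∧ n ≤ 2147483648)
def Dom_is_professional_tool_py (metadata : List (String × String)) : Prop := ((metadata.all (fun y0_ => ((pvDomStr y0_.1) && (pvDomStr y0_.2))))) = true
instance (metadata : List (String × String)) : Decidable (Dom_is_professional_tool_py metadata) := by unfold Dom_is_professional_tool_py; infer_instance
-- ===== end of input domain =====

-- B replaces A's nested field-loop/tool-loop with early return by a gather-then-scan
-- decomposition: all truthy creator-field values are collected once into a single
-- NUL-joined lowercased string, and each tool name is searched once in it (simpler).

-- ===== PORT A =====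
-- the two literal lists of A
def pvTools : List String :=
  ["Adobe InDesign", "InDesign", "LaTeX", "XeTeX", "LuaTeX", "Calibre",
   "Scribus", "QuarkXPress", "FrameMaker", "Microsoft Publisher", "Sigil", "Vellum"]

def pvFields : List String :=
  ["creator", "producer", "Application", "Creator", "Producer",
   "pdf:producer", "xmp:CreatorTool", "meta:creator"]

-- inner 'for tool in professional_tools: if tool.lower() in creator.lower(): return True'
def pvInnerA (creator : String) : List String → Bool
  | [] => false
  | t :: ts =>
    if PySem.Str.isIn (PySem.Str.lower t) (PySem.Str.lower creator) then true
    else pvInnerA creator ts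

-- outer 'for field in creator_fields: if field in metadata and metadata[field]: …'
def pvOuterA (metadata : List (String × String)) : List String → Bool
  | [] => false
  | f :: fs =>
    match PySem.Dict.get? ⟨metadata⟩ f with
    | some v =>
      if v ≠ "" then
        -- creator = str(metadata[field]) : values are strings already
        if pvInnerA v pvTools then true else pvOuterA metadata fs
      else pvOuterA metadata fs
    | none => pvOuterA metadata fs

def is_professional_tool_py (metadata : List (String × String)) : Bool :=
  if metadata = [] then false
  else pvOuterA metadata pvFields

-- ===== PORT B =====
def is_professional_tool_py_alt (metadata : List (String × String)) : Bool :=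
  if metadata = [] then false
  else
    -- values = [str(metadata[f]) for f in creator_fields if f in metadata and metadata[f]]
    let values := pvFields.filterMap (fun f =>
      match PySem.Dict.get? ⟨metadata⟩ f with
      | some v => if v ≠ "" then some v else none
      | none => none)
    -- combined = "\x00".join(values).lower()
    let combined := PySem.Str.lower (PySem.Str.join "\x00" values)
    pvTools.any (fun t => PySem.Str.isIn (PySem.Str.lower t) combined)

-- ===== PRECONDITION & SPEC =====
def Spec_is_professional_tool_py (metadata : List (String × String)) (out : Bool) : Prop := out = is_professional_tool_py_alt metadata
instance (metadata : List (String × String)) (out : Bool) : Decidable (Spec_is_professional_tool_py metadata out) := by unfold Spec_is_professional_tool_py; infer_instance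

-- ===== CLAIM (what is proved, stated in full; the proofs are below) =====
def Claim_equal_is_professional_tool_py : Prop := ∀ (metadata : List (String × String)), Dom_is_professional_tool_py metadata → Spec_is_professional_tool_py metadata (is_professional_tool_py metadata)

-- ===== LEMMAS AND PROOFS =====

-- a prefix of u ++ c :: v that avoids c is a prefix of u
lemma prefix_split {p u v : List Char} {c : Char}
    (h : p <+: u ++ c :: v) (hc : c ∉ p) : p <+: u := by
  by_cases hl : p.length ≤ u.length
  · rw [List.prefix_iff_eq_take] at h ⊢
    rwa [List.take_append_of_le_length hl] at h
  · exfalso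
    have hlt : u.length < p.length := by omega
    have hg := h.getElem (i := u.length) hlt
    rw [List.getElem_append_right (le_refl u.length)] at hg
    simp at hg
    exact hc (hg ▸ List.getElem_mem hlt)

-- an infix of u ++ c :: v that avoids c (and is nonempty) is an infix of u or of v
lemma infix_split {p : List Char} {c : Char} (hp : p ≠ []) (hc : c ∉ p) :
    ∀ {u v : List Char}, p <:+: u ++ c :: v → p <:+: u ∨ p <:+: v := by
  intro u
  induction u with
  | nil =>
    intro v h
    rw [List.nil_append, List.infix_cons_iff] at h
    rcases h with h | h
    · exact absurd (List.prefix_nil.mp (prefix_split (u := []) h hc)) hp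
    · exact Or.inr h
  | cons a u' ih =>
    intro v h
    rw [List.cons_append, List.infix_cons_iff] at h
    rcases h with h | h
    · exact Or.inl ((prefix_split (u := a :: u') (by simpa using h) hc).isInfix)
    · rcases ih h with h | h
      · exact Or.inl (List.infix_cons h)
      · exact Or.inr h

-- a nonempty pattern avoiding the separator is an infix of the join iff it is an infix of a part
lemma infix_intercalate {p : List Char} {c : Char} (hp : p ≠ []) (hc : c ∉ p) :
    ∀ (parts : List (List Char)),
      (p <:+: [c].intercalate parts ↔ ∃ q ∈ parts, p <:+: q)
  | [] => by
    have h0 : [c].intercalate ([] : List (List Char)) = [] := by simp [List.intercalate]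
    rw [h0]
    constructor
    · intro h; exact absurd (List.eq_nil_of_infix_nil h) hp
    · rintro ⟨q, hq, -⟩; simp at hq
  | [x] => by
    simp [List.intercalate]
  | x :: y :: rest => by
    have hrec : [c].intercalate (x :: y :: rest) = x ++ c :: [c].intercalate (y :: rest) := by
      simp [List.intercalate]
    rw [hrec]
    constructor
    · intro h
      rcases infix_split hp hc h with h | h
      · exact ⟨x, by simp, h⟩
      · rcases (infix_intercalate hp hc (y :: rest)).mp h with ⟨q, hq, hinf⟩
        exact ⟨q, List.mem_cons_of_mem _ hq, hinf⟩
    · rintro ⟨q, hq, hinf⟩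
      rcases List.mem_cons.mp hq with rfl | hq
      · exact List.infix_append_of_infix_left hinf
      · have hmid : p <:+: [c].intercalate (y :: rest) :=
          (infix_intercalate hp hc (y :: rest)).mpr ⟨q, hq, hinf⟩
        exact List.infix_append_of_infix_right (List.infix_cons hmid)

-- characterisation of A's inner loop
lemma innerA_iff (creator : String) (ts : List String) :
    pvInnerA creator ts = true ↔
      ∃ t ∈ ts, PySem.Str.isIn (PySem.Str.lower t) (PySem.Str.lower creator) = true := by
  induction ts with
  | nil => simp [pvInnerA]
  | cons t ts ih =>
    simp only [pvInnerA]
    split_ifs with h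
    · exact iff_of_true rfl ⟨t, List.mem_cons_self, h⟩
    · rw [ih]
      constructor
      · rintro ⟨t', ht', h'⟩; exact ⟨t', List.mem_cons_of_mem _ ht', h'⟩
      · rintro ⟨t', ht', h'⟩
        rcases List.mem_cons.mp ht' with rfl | ht'
        · exact absurd h' h
        · exact ⟨t', ht', h'⟩

-- characterisation of A's outer loop
lemma outerA_iff (metadata : List (String × String)) (fs : List String) :
    pvOuterA metadata fs = true ↔
      ∃ f ∈ fs, ∃ v, PySem.Dict.get? ⟨metadata⟩ f = some v ∧ v ≠ "" ∧
        pvInnerA v pvTools = true := by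
  induction fs with
  | nil => simp [pvOuterA]
  | cons f fs ih =>
    simp only [pvOuterA]
    cases hg : PySem.Dict.get? (⟨metadata⟩ : PySem.Dict String String) f with
    | none =>
      rw [ih]
      constructor
      · rintro ⟨f', hf', rest⟩; exact ⟨f', List.mem_cons_of_mem _ hf', rest⟩
      · rintro ⟨f', hf', v', hg', rest⟩
        rcases List.mem_cons.mp hf' with rfl | hf'
        · rw [hg] at hg'; exact absurd hg' (by simp)
        · exact ⟨f', hf', v', hg', rest⟩
    | some v =>
      by_cases hv : v = ""
      · simp only [hv, ne_eq, not_true_eq_false, if_false, ih]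
        constructor
        · rintro ⟨f', hf', rest⟩; exact ⟨f', List.mem_cons_of_mem _ hf', rest⟩
        · rintro ⟨f', hf', v', hg', hv', rest⟩
          rcases List.mem_cons.mp hf' with rfl | hf'
          · rw [hg] at hg'; injection hg' with hvv; subst hvv; exact absurd hv hv'
          · exact ⟨f', hf', v', hg', hv', rest⟩
      · simp only [ne_eq, hv, not_false_eq_true, if_true]
        by_cases hi : pvInnerA v pvTools = true
        · rw [if_pos hi]
          constructor
          · intro _; exact ⟨f, List.mem_cons_self, v, hg, hv, hi⟩
          · intro _; rfl
        · rw [if_neg hi, ih]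
          constructor
          · rintro ⟨f', hf', rest⟩; exact ⟨f', List.mem_cons_of_mem _ hf', rest⟩
          · rintro ⟨f', hf', v', hg', hv', hi'⟩
            rcases List.mem_cons.mp hf' with rfl | hf'
            · rw [hg] at hg'; injection hg' with hvv; exact absurd (hvv ▸ hi') hi
            · exact ⟨f', hf', v', hg', hv', hi'⟩

-- every lowered tool name is nonempty and NUL-free
lemma tools_sep_free : ∀ t ∈ pvTools,
    (PySem.Str.lower t).toList ≠ [] ∧ '\x00' ∉ (PySem.Str.lower t).toList := by decide

-- lowering a string fixes NUL
lemma lowerChar_nul : PySem.Chars.lowerChar '\x00' = '\x00' := by decide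

-- lowering commutes with NUL-joining
lemma lower_intercalate : ∀ (ls : List (List Char)),
    PySem.Chars.lower (['\x00'].intercalate ls) = ['\x00'].intercalate (ls.map PySem.Chars.lower)
  | [] => by simp [List.intercalate, PySem.Chars.lower]
  | [x] => by simp [List.intercalate]
  | x :: y :: rest => by
    have h1 : ['\x00'].intercalate (x :: y :: rest)
        = x ++ '\x00' :: ['\x00'].intercalate (y :: rest) := by simp [List.intercalate]
    have h2 : ['\x00'].intercalate ((x :: y :: rest).map PySem.Chars.lower)
        = PySem.Chars.lower x ++ '\x00' :: ['\x00'].intercalate ((y :: rest).map PySem.Chars.lower) := by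
      simp [List.intercalate]
    rw [h1, h2, ← lower_intercalate (y :: rest)]
    simp [PySem.Chars.lower, lowerChar_nul]

-- B's per-tool scan of the joined string finds exactly the tools some value contains
lemma alt_scan_iff (t : String) (ht : t ∈ pvTools) (values : List String) :
    PySem.Str.isIn (PySem.Str.lower t) (PySem.Str.lower (PySem.Str.join "\x00" values)) = true
      ↔ ∃ v ∈ values, PySem.Str.isIn (PySem.Str.lower t) (PySem.Str.lower v) = true := by
  obtain ⟨hne, hnul⟩ := tools_sep_free t ht
  rw [PySem.Str.toList_lower] at hne hnul
  have hsep : ("\x00" : String).toList = ['\x00'] := by decide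
  rw [PySem.Str.isIn_iff_infix]
  simp only [PySem.Str.toList_lower, PySem.Str.join, PySem.Chars.join, String.toList_ofList, hsep]
  rw [lower_intercalate, infix_intercalate hne hnul]
  simp only [List.map_map, List.mem_map, Function.comp]
  constructor
  · rintro ⟨q, ⟨v, hv, rfl⟩, h⟩
    exact ⟨v, hv, by rw [PySem.Str.isIn_iff_infix]; simp only [PySem.Str.toList_lower]; exact h⟩
  · rintro ⟨v, hv, h⟩
    exact ⟨_, ⟨v, hv, rfl⟩, by rw [PySem.Str.isIn_iff_infix] at h; simp only [PySem.Str.toList_lower] at h; exact h⟩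

-- membership in B's gathered value list
lemma mem_values_iff (metadata : List (String × String)) (v : String) :
    (v ∈ pvFields.filterMap (fun f =>
        match PySem.Dict.get? (⟨metadata⟩ : PySem.Dict String String) f with
        | some v' => if v' ≠ "" then some v' else none
        | none => none))
      ↔ ∃ f ∈ pvFields, PySem.Dict.get? (⟨metadata⟩ : PySem.Dict String String) f = some v ∧ v ≠ "" := by
  rw [List.mem_filterMap]
  constructor
  · rintro ⟨f, hf, hsome⟩
    refine ⟨f, hf, ?_⟩
    cases hg : PySem.Dict.get? (⟨metadata⟩ : PySem.Dict String String) f with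
    | none => rw [hg] at hsome; exact absurd hsome (by simp)
    | some v' =>
      rw [hg] at hsome
      by_cases hv' : v' = ""
      · simp [hv'] at hsome
      · simp only [ne_eq, hv', not_false_eq_true, if_true, Option.some_inj] at hsome
        subst hsome; exact ⟨rfl, hv'⟩
  · rintro ⟨f, hf, hg, hv⟩
    exact ⟨f, hf, by rw [hg]; simp [hv]⟩

-- ===== VERDICT (by name: the statement is the Claim_ definition above) =====
theorem is_professional_tool_py_spec : Claim_equal_is_professional_tool_py := by
  intro metadata _
  unfold Spec_is_professional_tool_py
  by_cases hm : metadata = []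
  · simp [is_professional_tool_py, is_professional_tool_py_alt, hm]
  · simp only [is_professional_tool_py, is_professional_tool_py_alt, hm, if_false]
    rw [Bool.eq_iff_iff, outerA_iff, List.any_eq_true]
    constructor
    · rintro ⟨f, hf, v, hg, hv, hi⟩
      rcases (innerA_iff v pvTools).mp hi with ⟨t, ht, hin⟩
      refine ⟨t, ht, (alt_scan_iff t ht _).mpr ?_⟩
      exact ⟨v, (mem_values_iff metadata v).mpr ⟨f, hf, hg, hv⟩, hin⟩
    · rintro ⟨t, ht, hscan⟩
      rcases (alt_scan_iff t ht _).mp hscan with ⟨v, hv, hin⟩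
      rcases (mem_values_iff metadata v).mp hv with ⟨f, hf, hg, hvne⟩
      exact ⟨f, hf, v, hg, hvne, (innerA_iff v pvTools).mpr ⟨t, ht, hin⟩⟩
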